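-- pv_equiv track=rewrite | github.com/Try431/discord_chat_data_viz | graph.py | get_highest_msg_count_and_day_per_author
-- ===== SOURCE A (Python) =====
-- def get_highest_msg_count_and_day_per_author(data):
--     highest_author_count = {}
--     highest_author_day = {}
--     for day in data:
--         author_day_counts = data[day]
--         for author in author_day_counts:
--             if author_day_counts[author] > highest_author_count.get(author, 0):
--                 highest_author_count[author] = author_day_counts[author]
--                 highest_author_day[author] = day
--     data = {}
--     for auth in highest_author_count:
--         # this handles the case where multiple people sent their highest number of messages on the same day
--         if highest_author_day[auth] in data:
--           data[highest_author_day[auth]].update({auth: highest_author_count[auth]})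
--         else:
--           data[highest_author_day[auth]] = {auth: highest_author_count[auth]}
--
--     return data
-- ===== SOURCE B (Python) =====
-- def get_highest_msg_count_and_day_per_author(data):
--     # Invert to an author-major table first (only positive counts can ever win,
--     # since the best starts at 0 and only strictly larger counts replace it).
--     per_author = {}
--     for day, day_counts in data.items():
--         for author, count in day_counts.items():
--             if count > 0:
--                 if author in per_author:
--                     per_author[author][day] = count
--                 else:
--                     per_author[author] = {day: count}
--     result = {}
--     for author, day_counts in per_author.items():
--         best, best_day = 0, None
--         for day, count in day_counts.items():
--             if count > best:
--                 best, best_day = count, day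
--         if best_day is not None:
--             if best_day in result:
--                 result[best_day][author] = best
--             else:
--                 result[best_day] = {author: best}
--     return result
-- ===== Notes on version B (the rewrite author's own statement) =====
-- stated objective: alternative
-- what changed: Replaces A's day-major interleaved running-max over two parallel author dicts by first inverting the data into an author-major table of positive day counts and then scanning each author's days independently for its best day; Pre_ excludes association lists with duplicate day keys or duplicate author keys within a day, which cannot arise from a Python dict and whose dict reading is ambiguous.
import Mathlib
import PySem

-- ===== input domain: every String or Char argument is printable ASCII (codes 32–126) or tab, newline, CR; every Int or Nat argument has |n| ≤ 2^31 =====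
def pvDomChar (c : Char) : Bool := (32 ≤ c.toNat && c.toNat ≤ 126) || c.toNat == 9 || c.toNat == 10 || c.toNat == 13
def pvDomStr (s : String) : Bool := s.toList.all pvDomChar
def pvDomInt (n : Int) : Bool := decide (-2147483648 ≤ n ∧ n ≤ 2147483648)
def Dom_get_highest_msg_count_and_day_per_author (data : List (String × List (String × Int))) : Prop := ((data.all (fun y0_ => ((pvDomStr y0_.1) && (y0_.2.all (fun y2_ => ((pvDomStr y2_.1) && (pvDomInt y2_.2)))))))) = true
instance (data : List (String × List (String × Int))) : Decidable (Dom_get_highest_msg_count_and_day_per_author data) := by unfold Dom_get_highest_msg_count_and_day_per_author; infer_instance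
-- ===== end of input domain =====

-- B inverts the data into an author-major table of positive day counts and scans each
-- author's days for its best day, instead of A's day-major running max over two parallel
-- author dicts (objective: alternative decomposition; return value only, no mutation).

-- ===== PORT A =====
-- one inner day-loop step: 'if author_day_counts[author] > highest_author_count.get(author, 0): …'
-- (day/author iterate dict keys with a lookup; exact as the pair's value since dict keys are unique)
def pvA1 (st : PySem.Dict String Int × PySem.Dict String String) (p : String × List (String × Int)) :
    PySem.Dict String Int × PySem.Dict String String :=
  p.2.foldl (fun st ap =>
    if ap.2 > st.1.getD ap.1 0 then (st.1.insert ap.1 ap.2, st.2.insert ap.1 p.1) else st) st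

-- one step of the grouping loop 'for auth in highest_author_count: …'
def pvA2 (hd : PySem.Dict String String) (out : PySem.Dict String (PySem.Dict String Int))
    (q : String × Int) : PySem.Dict String (PySem.Dict String Int) :=
  match out.get? (hd.getD q.1 "") with
  | some m => out.insert (hd.getD q.1 "") (m.insert q.1 q.2)
  | none => out.insert (hd.getD q.1 "") (PySem.Dict.mk [(q.1, q.2)])

def get_highest_msg_count_and_day_per_author (data : List (String × List (String × Int))) : List (String × List (String × Int)) :=
  let st := data.foldl pvA1 (PySem.Dict.empty, PySem.Dict.empty)
  let out := st.1.items.foldl (pvA2 st.2) PySem.Dict.empty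
  out.items.map (fun q => (q.1, q.2.items))

-- ===== PORT B =====
-- inner inversion step: 'if count > 0: per_author[author][day] = count (new dict if absent)'
def pvB1 (day : String) (tbl : PySem.Dict String (PySem.Dict String Int)) (ap : String × Int) :
    PySem.Dict String (PySem.Dict String Int) :=
  if ap.2 > 0 then
    match tbl.get? ap.1 with
    | some m => tbl.insert ap.1 (m.insert day ap.2)
    | none => tbl.insert ap.1 (PySem.Dict.mk [(day, ap.2)])
  else tbl

-- author-major step: scan this author's days for its best, then group by best day
def pvB2 (out : PySem.Dict String (PySem.Dict String Int)) (q : String × PySem.Dict String Int) :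
    PySem.Dict String (PySem.Dict String Int) :=
  let best := q.2.items.foldl (fun b dc => if dc.2 > b.1 then (dc.2, some dc.1) else b)
    ((0 : Int), (none : Option String))
  match best.2 with
  | some bd =>
    match out.get? bd with
    | some m => out.insert bd (m.insert q.1 best.1)
    | none => out.insert bd (PySem.Dict.mk [(q.1, best.1)])
  | none => out

def get_highest_msg_count_and_day_per_author_alt (data : List (String × List (String × Int))) : List (String × List (String × Int)) :=
  let tbl := data.foldl (fun tbl p => p.2.foldl (pvB1 p.1) tbl) PySem.Dict.empty
  let out := tbl.items.foldl pvB2 PySem.Dict.empty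
  out.items.map (fun q => (q.1, q.2.items))

-- ===== PRECONDITION & SPEC =====
-- Pre_ excludes association lists with duplicate day keys or duplicate author keys within a
-- day: they cannot arise from a Python dict, so their dict reading is ambiguous.
def Pre_get_highest_msg_count_and_day_per_author (data : List (String × List (String × Int))) : Prop :=
  (data.map Prod.fst).Nodup ∧ ∀ p ∈ data, (p.2.map Prod.fst).Nodup
instance (data : List (String × List (String × Int))) : Decidable (Pre_get_highest_msg_count_and_day_per_author data) := by unfold Pre_get_highest_msg_count_and_day_per_author; infer_instance
def pvWitness_get_highest_msg_count_and_day_per_author : (List (String × List (String × Int))) :=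
  [("2020-01-01", [("alice", 2), ("bob", 0)]), ("2020-01-02", [("alice", 3)])]

def Spec_get_highest_msg_count_and_day_per_author (data : List (String × List (String × Int))) (out : List (String × List (String × Int))) : Prop := out = get_highest_msg_count_and_day_per_author_alt data
instance (data : List (String × List (String × Int))) (out : List (String × List (String × Int))) : Decidable (Spec_get_highest_msg_count_and_day_per_author data out) := by unfold Spec_get_highest_msg_count_and_day_per_author; infer_instance

-- ===== CLAIM (what is proved, stated in full; the proofs are below) =====
def Claim_equal_get_highest_msg_count_and_day_per_author : Prop := ∀ (data : List (String × List (String × Int))), Dom_get_highest_msg_count_and_day_per_author data → Pre_get_highest_msg_count_and_day_per_author data → Spec_get_highest_msg_count_and_day_per_author data (get_highest_msg_count_and_day_per_author data)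

-- ===== LEMMAS AND PROOFS =====

-- abstract joint state: one entry per author with a positive count so far:
-- (author, its positive (day, count) pairs so far, running best count, its day)
abbrev pvEntry : Type := String × List (String × Int) × Int × String

-- the flattened traversal both phase-1 loops perform
def pvTriples (data : List (String × List (String × Int))) : List (String × String × Int) :=
  data.flatMap (fun p => p.2.map (fun ap => (p.1, ap.1, ap.2)))

def pvStepA (st : PySem.Dict String Int × PySem.Dict String String) (t : String × String × Int) :
    PySem.Dict String Int × PySem.Dict String String :=
  if t.2.2 > st.1.getD t.2.1 0 then (st.1.insert t.2.1 t.2.2, st.2.insert t.2.1 t.1) else st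

def pvStepB (tbl : PySem.Dict String (PySem.Dict String Int)) (t : String × String × Int) :
    PySem.Dict String (PySem.Dict String Int) :=
  pvB1 t.1 tbl (t.2.1, t.2.2)

def pvUpd (day : String) (c : Int) (a : String) (e : pvEntry) : pvEntry :=
  if e.1 = a then (e.1, e.2.1 ++ [(day, c)], if c > e.2.2.1 then (c, day) else (e.2.2.1, e.2.2.2))
  else e

def pvAbsStep (L : List pvEntry) (t : String × String × Int) : List pvEntry :=
  if t.2.2 > 0 then
    if t.2.1 ∈ L.map (fun e => e.1) then L.map (pvUpd t.1 t.2.2 t.2.1)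
    else L ++ [(t.2.1, [(t.1, t.2.2)], t.2.2, t.1)]
  else L

def pvHc (L : List pvEntry) : PySem.Dict String Int := PySem.Dict.mk (L.map (fun e => (e.1, e.2.2.1)))
def pvHd (L : List pvEntry) : PySem.Dict String String := PySem.Dict.mk (L.map (fun e => (e.1, e.2.2.2)))
def pvTbl (L : List pvEntry) : PySem.Dict String (PySem.Dict String Int) :=
  PySem.Dict.mk (L.map (fun e => (e.1, PySem.Dict.mk e.2.1)))

def pvScan (m : List (String × Int)) : Int × Option String :=
  m.foldl (fun b dc => if dc.2 > b.1 then (dc.2, some dc.1) else b) ((0 : Int), (none : Option String))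

def pvGood (L : List pvEntry) : Prop :=
  (L.map (fun e => e.1)).Nodup ∧
  ∀ e ∈ L, 0 < e.2.2.1 ∧ pvScan e.2.1 = (e.2.2.1, some e.2.2.2)

def pvFresh (ts : List (String × String × Int)) (L : List pvEntry) : Prop :=
  ∀ t ∈ ts, ∀ e ∈ L, e.1 = t.2.1 → t.1 ∉ e.2.1.map Prod.fst

def pvNodupPairs (ts : List (String × String × Int)) : Prop :=
  (ts.map (fun t => (t.2.1, t.1))).Nodup

theorem pvA1_flatten (data : List (String × List (String × Int)))
    (st : PySem.Dict String Int × PySem.Dict String String) :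
    data.foldl pvA1 st = (pvTriples data).foldl pvStepA st := by
  induction data generalizing st with
  | nil => rfl
  | cons p rest ih =>
    simp only [List.foldl_cons, pvTriples, List.flatMap_cons, List.foldl_append, ih]
    congr 1
    rw [List.foldl_map]
    rfl

theorem pvB1_flatten (data : List (String × List (String × Int)))
    (tbl : PySem.Dict String (PySem.Dict String Int)) :
    data.foldl (fun tbl p => p.2.foldl (pvB1 p.1) tbl) tbl = (pvTriples data).foldl pvStepB tbl := by
  induction data generalizing tbl with
  | nil => rfl
  | cons p rest ih =>
    simp only [List.foldl_cons, pvTriples, List.flatMap_cons, List.foldl_append, ih]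
    congr 1
    rw [List.foldl_map]
    rfl

theorem pvKeysHc (L : List pvEntry) : (pvHc L).keys = L.map (fun e => e.1) := by
  simp [pvHc, PySem.Dict.keys_mk, List.map_map]

theorem pvKeysHd (L : List pvEntry) : (pvHd L).keys = L.map (fun e => e.1) := by
  simp [pvHd, PySem.Dict.keys_mk, List.map_map]

theorem pvKeysTbl (L : List pvEntry) : (pvTbl L).keys = L.map (fun e => e.1) := by
  simp [pvTbl, PySem.Dict.keys_mk, List.map_map]

theorem pvUniq (L : List pvEntry) (hnd : (L.map (fun e => e.1)).Nodup) {e e' : pvEntry}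
    (he : e ∈ L) (he' : e' ∈ L) (h1 : e'.1 = e.1) : e' = e :=
  List.inj_on_of_nodup_map hnd he' he h1

theorem pvStepA_sim (L : List pvEntry) (t : String × String × Int) (hg : pvGood L) :
    pvStepA (pvHc L, pvHd L) t = (pvHc (pvAbsStep L t), pvHd (pvAbsStep L t)) := by
  obtain ⟨day, a, c⟩ := t
  by_cases hm : a ∈ L.map (fun e => e.1)
  · obtain ⟨e, heL, he1⟩ := List.mem_map.1 hm
    have hic : (a, e.2.2.1) ∈ (pvHc L).items := by rw [← he1]; exact List.mem_map_of_mem heL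
    have hgd : (pvHc L).getD a 0 = e.2.2.1 :=
      PySem.Dict.getD_of_mem_items _ hic (by rw [pvKeysHc]; exact hg.1) 0
    have hpos : 0 < e.2.2.1 := (hg.2 e heL).1
    have hcontc : (pvHc L).contains a = true := by
      rw [PySem.Dict.contains_eq_decide_mem_keys, pvKeysHc]; simp [hm]
    have hcontd : (pvHd L).contains a = true := by
      rw [PySem.Dict.contains_eq_decide_mem_keys, pvKeysHd]; simp [hm]
    by_cases hgt : c > e.2.2.1
    · have hc0 : (0:Int) < c := by omega
      have habs : pvAbsStep L (day, a, c) = L.map (pvUpd day c a) := by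
        simp [pvAbsStep, hc0, hm]
      rw [habs]
      simp only [pvStepA]
      rw [if_pos (by rw [hgd]; exact hgt)]
      refine Prod.ext ?_ ?_
      · apply PySem.Dict.ext
        rw [show ((pvHc L).insert a c, (pvHd L).insert a day).1 = (pvHc L).insert a c from rfl,
          PySem.Dict.items_insert_of_contains _ _ hcontc]
        show List.map _ (L.map _) = List.map _ (L.map _)
        rw [List.map_map, List.map_map]
        apply List.map_congr_left
        intro e' he'
        by_cases h1 : e'.1 = a
        · have := pvUniq L hg.1 heL he' (by rw [h1, he1]); subst this
          simp [Function.comp, pvUpd, h1, hgt]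
        · simp [Function.comp, pvUpd, h1]
      · apply PySem.Dict.ext
        rw [show ((pvHc L).insert a c, (pvHd L).insert a day).2 = (pvHd L).insert a day from rfl,
          PySem.Dict.items_insert_of_contains _ _ hcontd]
        show List.map _ (L.map _) = List.map _ (L.map _)
        rw [List.map_map, List.map_map]
        apply List.map_congr_left
        intro e' he'
        by_cases h1 : e'.1 = a
        · have := pvUniq L hg.1 heL he' (by rw [h1, he1]); subst this
          simp [Function.comp, pvUpd, h1, hgt]
        · simp [Function.comp, pvUpd, h1]
    · have hstep : pvStepA (pvHc L, pvHd L) (day, a, c) = (pvHc L, pvHd L) := by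
        simp only [pvStepA]; rw [if_neg (by rw [hgd]; exact hgt)]
      rw [hstep]
      by_cases hc0 : (0:Int) < c
      · have habs : pvAbsStep L (day, a, c) = L.map (pvUpd day c a) := by
          simp [pvAbsStep, hc0, hm]
        rw [habs]
        refine Prod.ext ?_ ?_ <;>
        · apply PySem.Dict.ext
          show List.map _ L = List.map _ (L.map _)
          rw [List.map_map]
          apply List.map_congr_left
          intro e' he'
          by_cases h1 : e'.1 = a
          · have := pvUniq L hg.1 heL he' (by rw [h1, he1]); subst this
            simp [Function.comp, pvUpd, h1, hgt]
          · simp [Function.comp, pvUpd, h1]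
      · simp [pvAbsStep, hc0]
  · have hcontc : (pvHc L).contains a = false := by
      rw [PySem.Dict.contains_eq_decide_mem_keys, pvKeysHc]; simp [hm]
    have hcontd : (pvHd L).contains a = false := by
      rw [PySem.Dict.contains_eq_decide_mem_keys, pvKeysHd]; simp [hm]
    have hgd : (pvHc L).getD a 0 = 0 := PySem.Dict.getD_of_not_contains _ _ hcontc
    by_cases hc0 : (0:Int) < c
    · have habs : pvAbsStep L (day, a, c) = L ++ [(a, [(day, c)], c, day)] := by
        simp [pvAbsStep, hc0, hm]
      rw [habs]
      simp only [pvStepA]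
      rw [if_pos (by rw [hgd]; exact hc0)]
      refine Prod.ext ?_ ?_
      · apply PySem.Dict.ext
        rw [show ((pvHc L).insert a c, (pvHd L).insert a day).1 = (pvHc L).insert a c from rfl,
          PySem.Dict.items_insert_of_not_contains _ _ hcontc]
        show List.map _ L ++ _ = List.map _ (L ++ _)
        rw [List.map_append]
        rfl
      · apply PySem.Dict.ext
        rw [show ((pvHc L).insert a c, (pvHd L).insert a day).2 = (pvHd L).insert a day from rfl,
          PySem.Dict.items_insert_of_not_contains _ _ hcontd]
        show List.map _ L ++ _ = List.map _ (L ++ _)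
        rw [List.map_append]
        rfl
    · simp only [pvStepA]
      rw [if_neg (by rw [hgd]; omega)]
      simp [pvAbsStep, hc0]

theorem pvStepB_sim (L : List pvEntry) (t : String × String × Int) (hg : pvGood L)
    (hf : ∀ e ∈ L, e.1 = t.2.1 → t.1 ∉ e.2.1.map Prod.fst) :
    pvStepB (pvTbl L) t = pvTbl (pvAbsStep L t) := by
  obtain ⟨day, a, c⟩ := t
  by_cases hc0 : (0:Int) < c
  · by_cases hm : a ∈ L.map (fun e => e.1)
    · obtain ⟨e, heL, he1⟩ := List.mem_map.1 hm
      have hit : (a, PySem.Dict.mk e.2.1) ∈ (pvTbl L).items := by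
        rw [← he1]; exact List.mem_map_of_mem heL
      have hget : (pvTbl L).get? a = some (PySem.Dict.mk e.2.1) :=
        PySem.Dict.get?_of_mem_items _ hit (by rw [pvKeysTbl]; exact hg.1)
      have hfr : day ∉ e.2.1.map Prod.fst := hf e heL he1
      have hcontm : (PySem.Dict.mk e.2.1).contains day = false := by
        rw [PySem.Dict.contains_eq_decide_mem_keys, PySem.Dict.keys_mk]; simp [hfr]
      have hinner : (PySem.Dict.mk e.2.1).insert day c = PySem.Dict.mk (e.2.1 ++ [(day, c)]) := by
        apply PySem.Dict.ext
        rw [PySem.Dict.items_insert_of_not_contains _ _ hcontm]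
      have hcontt : (pvTbl L).contains a = true := by
        rw [PySem.Dict.contains_eq_decide_mem_keys, pvKeysTbl]; simp [hm]
      have habs : pvAbsStep L (day, a, c) = L.map (pvUpd day c a) := by
        simp [pvAbsStep, hc0, hm]
      rw [habs]
      simp only [pvStepB, pvB1]
      rw [if_pos hc0, hget]
      show (pvTbl L).insert a ((PySem.Dict.mk e.2.1).insert day c) = _
      rw [hinner]
      apply PySem.Dict.ext
      rw [PySem.Dict.items_insert_of_contains _ _ hcontt]
      show List.map _ (L.map _) = List.map _ (L.map _)
      rw [List.map_map, List.map_map]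
      apply List.map_congr_left
      intro e' he'
      by_cases h1 : e'.1 = a
      · have := pvUniq L hg.1 heL he' (by rw [h1, he1]); subst this
        simp [Function.comp, pvUpd, h1]
      · simp [Function.comp, pvUpd, h1]
    · have hnone : (pvTbl L).get? a = none :=
        (PySem.Dict.get?_eq_none_iff_not_mem_keys _ _).2 (by rw [pvKeysTbl]; exact hm)
      have hcontt : (pvTbl L).contains a = false := by
        rw [PySem.Dict.contains_eq_decide_mem_keys, pvKeysTbl]; simp [hm]
      have habs : pvAbsStep L (day, a, c) = L ++ [(a, [(day, c)], c, day)] := by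
        simp [pvAbsStep, hc0, hm]
      rw [habs]
      simp only [pvStepB, pvB1]
      rw [if_pos hc0, hnone]
      show (pvTbl L).insert a (PySem.Dict.mk [(day, c)]) = _
      apply PySem.Dict.ext
      rw [PySem.Dict.items_insert_of_not_contains _ _ hcontt]
      show List.map _ L ++ _ = List.map _ (L ++ _)
      rw [List.map_append]
      rfl
  · simp [pvStepB, pvB1, pvAbsStep, hc0]

theorem pvGood_step (L : List pvEntry) (t : String × String × Int) (hg : pvGood L)
    (hf : ∀ e ∈ L, e.1 = t.2.1 → t.1 ∉ e.2.1.map Prod.fst) :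
    pvGood (pvAbsStep L t) := by
  obtain ⟨day, a, c⟩ := t
  by_cases hc0 : (0:Int) < c
  · by_cases hm : a ∈ L.map (fun e => e.1)
    · have habs : pvAbsStep L (day, a, c) = L.map (pvUpd day c a) := by
        simp [pvAbsStep, hc0, hm]
      rw [habs]
      constructor
      · have hkeys : (L.map (pvUpd day c a)).map (fun e => e.1) = L.map (fun e => e.1) := by
          rw [List.map_map]
          apply List.map_congr_left
          intro e' _
          by_cases h1 : e'.1 = a <;> simp [Function.comp, pvUpd, h1]
        rw [hkeys]; exact hg.1
      · intro e'' he''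
        obtain ⟨e', he', rfl⟩ := List.mem_map.1 he''
        by_cases h1 : e'.1 = a
        · obtain ⟨hpos, hsc⟩ := hg.2 e' he'
          have hsc' : pvScan (e'.2.1 ++ [(day, c)]) =
              if c > e'.2.2.1 then (c, some day) else (e'.2.2.1, some e'.2.2.2) := by
            unfold pvScan
            rw [List.foldl_append,
              show List.foldl _ ((0:Int), (none : Option String)) e'.2.1 = pvScan e'.2.1 from rfl,
              hsc]
            simp [List.foldl_cons, List.foldl_nil]
          simp only [pvUpd, if_pos h1]
          constructor
          · by_cases hgt : c > e'.2.2.1 <;> simp [hgt] <;> omega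
          · rw [hsc']
            by_cases hgt : c > e'.2.2.1 <;> simp [hgt]
        · simp only [pvUpd, if_neg h1]
          exact hg.2 e' he'
    · have habs : pvAbsStep L (day, a, c) = L ++ [(a, [(day, c)], c, day)] := by
        simp [pvAbsStep, hc0, hm]
      rw [habs]
      constructor
      · rw [List.map_append]
        refine List.Nodup.append hg.1 (by simp) ?_
        intro x hx hx'
        simp only [List.map_cons, List.map_nil, List.mem_singleton] at hx'
        subst hx'
        exact hm hx
      · intro e'' he''
        rcases List.mem_append.1 he'' with h | h
        · exact hg.2 e'' h
        · simp only [List.mem_singleton] at h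
          subst h
          refine ⟨hc0, ?_⟩
          simp [pvScan, hc0]
  · simp only [pvAbsStep]
    rw [if_neg (by omega)]
    exact hg

theorem pvMain (ts : List (String × String × Int)) (L : List pvEntry)
    (hg : pvGood L) (hf : pvFresh ts L) (hn : pvNodupPairs ts) :
    ts.foldl pvStepA (pvHc L, pvHd L) = (pvHc (ts.foldl pvAbsStep L), pvHd (ts.foldl pvAbsStep L)) ∧
    ts.foldl pvStepB (pvTbl L) = pvTbl (ts.foldl pvAbsStep L) ∧
    pvGood (ts.foldl pvAbsStep L) := by
  induction ts generalizing L with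
  | nil => exact ⟨rfl, rfl, hg⟩
  | cons t ts ih =>
    have hft : ∀ e ∈ L, e.1 = t.2.1 → t.1 ∉ e.2.1.map Prod.fst :=
      fun e he => hf t (List.mem_cons_self) e he
    have hnc : ((t.2.1, t.1) ∉ ts.map (fun t => (t.2.1, t.1))) ∧ pvNodupPairs ts := by
      have := hn
      unfold pvNodupPairs at this ⊢
      rw [List.map_cons, List.nodup_cons] at this
      exact this
    have hd_ne : ∀ t' ∈ ts, t.2.1 = t'.2.1 → t'.1 ≠ t.1 := by
      intro t' ht' hauth heq
      exact hnc.1 (by rw [show ((t.2.1, t.1) : String × String) = (t'.2.1, t'.1) from by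
        rw [hauth, heq]]; exact List.mem_map_of_mem ht')
    have hfresh : pvFresh ts (pvAbsStep L t) := by
      intro t' ht' e'' he'' h1
      obtain ⟨day, a, c⟩ := t
      by_cases hc0 : (0:Int) < c
      · by_cases hm : a ∈ L.map (fun e => e.1)
        · rw [show pvAbsStep L (day, a, c) = L.map (pvUpd day c a) from by
            simp [pvAbsStep, hc0, hm]] at he''
          obtain ⟨e', he', rfl⟩ := List.mem_map.1 he''
          by_cases h2 : e'.1 = a
          · simp only [pvUpd, if_pos h2] at h1 ⊢
            rw [List.map_append, List.mem_append]
            rintro (hmem | hmem)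
            · exact hf t' (List.mem_cons_of_mem _ ht') e' he' h1 hmem
            · simp only [List.map_cons, List.map_nil, List.mem_singleton] at hmem
              exact hd_ne t' ht' (by rw [← h1, h2]) hmem
          · simp only [pvUpd, if_neg h2] at h1 ⊢
            exact hf t' (List.mem_cons_of_mem _ ht') e' he' h1
        · rw [show pvAbsStep L (day, a, c) = L ++ [(a, [(day, c)], c, day)] from by
            simp [pvAbsStep, hc0, hm]] at he''
          rcases List.mem_append.1 he'' with h | h
          · exact hf t' (List.mem_cons_of_mem _ ht') e'' h h1
          · simp only [List.mem_singleton] at h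
            subst h
            simp only [List.map_cons, List.map_nil, List.mem_singleton]
            exact hd_ne t' ht' (by rw [← h1])
      · rw [show pvAbsStep L (day, a, c) = L from by simp [pvAbsStep, hc0]] at he''
        exact hf t' (List.mem_cons_of_mem _ ht') e'' he'' h1
    simp only [List.foldl_cons]
    rw [pvStepA_sim L t hg, pvStepB_sim L t hg hft]
    exact ih (pvAbsStep L t) (pvGood_step L t hg hft) hfresh hnc.2

theorem pvPhase2 (L : List pvEntry) (hg : pvGood L) :
    (pvHc L).items.foldl (pvA2 (pvHd L)) PySem.Dict.empty =
    (pvTbl L).items.foldl pvB2 PySem.Dict.empty := by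
  show (L.map _).foldl _ _ = (L.map _).foldl _ _
  rw [List.foldl_map, List.foldl_map]
  apply PySem.List.foldl_congr_mem
  intro acc e heL
  have hid : (e.1, e.2.2.2) ∈ (pvHd L).items := List.mem_map_of_mem heL
  have hgd : (pvHd L).getD e.1 "" = e.2.2.2 :=
    PySem.Dict.getD_of_mem_items _ hid (by rw [pvKeysHd]; exact hg.1) ""
  have hsc : (PySem.Dict.mk e.2.1).items.foldl
      (fun b dc => if dc.2 > b.1 then (dc.2, some dc.1) else b)
      ((0:Int), (none : Option String)) = (e.2.2.1, some e.2.2.2) := (hg.2 e heL).2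
  simp only [pvA2, pvB2, hgd, hsc]

theorem pvNodupPairs_triples_aux : ∀ (data : List (String × List (String × Int))),
    (data.map Prod.fst).Nodup → (∀ p ∈ data, (p.2.map Prod.fst).Nodup) →
    pvNodupPairs (pvTriples data) := by
  intro data
  induction data with
  | nil => intro _ _; simp [pvNodupPairs, pvTriples]
  | cons p rest ih =>
    intro hnd hin
    rw [List.map_cons, List.nodup_cons] at hnd
    have ihr := ih hnd.2 (fun q hq => hin q (List.mem_cons_of_mem _ hq))
    unfold pvNodupPairs pvTriples at ihr ⊢
    simp only [List.flatMap_cons, List.map_append]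
    rw [List.nodup_append]
    refine ⟨?_, ihr, ?_⟩
    · rw [List.map_map]
      have hcomp : ((fun t : String × String × Int => (t.2.1, t.1)) ∘
          (fun ap : String × Int => (p.1, ap.1, ap.2))) = fun ap => (ap.1, p.1) := rfl
      rw [hcomp, show (p.2.map (fun ap => (ap.1, p.1))) =
          (p.2.map Prod.fst).map (fun x => (x, p.1)) from by rw [List.map_map]; rfl]
      exact (hin p List.mem_cons_self).map
        (fun x y h => by simpa using congrArg Prod.fst h)
    · intro x hx1 y hy
      rw [List.map_map] at hx1
      obtain ⟨ap, _, rfl⟩ := List.mem_map.1 hx1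
      obtain ⟨t, ht, rfl⟩ := List.mem_map.1 hy
      obtain ⟨q, hq, htq⟩ := List.mem_flatMap.1 ht
      obtain ⟨ap', _, rfl⟩ := List.mem_map.1 htq
      intro heq
      have hq1 : q.1 = p.1 := (congrArg Prod.snd heq).symm
      exact hnd.1 (by rw [← hq1]; exact List.mem_map_of_mem hq)

theorem pvNodupPairs_triples (data : List (String × List (String × Int)))
    (hpre : Pre_get_highest_msg_count_and_day_per_author data) :
    pvNodupPairs (pvTriples data) :=
  pvNodupPairs_triples_aux data hpre.1 hpre.2

-- ===== VERDICT (by name: the statement is the Claim_ definition above) =====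
theorem get_highest_msg_count_and_day_per_author_spec : Claim_equal_get_highest_msg_count_and_day_per_author := by
  intro data _ hpre
  unfold Spec_get_highest_msg_count_and_day_per_author
  unfold get_highest_msg_count_and_day_per_author get_highest_msg_count_and_day_per_author_alt
  have hmain := pvMain (pvTriples data) []
    (⟨List.nodup_nil, by intro e he; simp at he⟩)
    (by intro t ht e he; simp at he)
    (pvNodupPairs_triples data hpre)
  rw [pvA1_flatten, pvB1_flatten]
  have hA : List.foldl pvStepA (PySem.Dict.empty, PySem.Dict.empty) (pvTriples data) =
      (pvHc ((pvTriples data).foldl pvAbsStep []), pvHd ((pvTriples data).foldl pvAbsStep [])) := hmain.1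
  have hB : List.foldl pvStepB PySem.Dict.empty (pvTriples data) =
      pvTbl ((pvTriples data).foldl pvAbsStep []) := hmain.2.1
  rw [hA, hB]
  show ((pvHc ((pvTriples data).foldl pvAbsStep [])).items.foldl
      (pvA2 (pvHd ((pvTriples data).foldl pvAbsStep []))) PySem.Dict.empty).items.map
      (fun q => (q.1, q.2.items)) = _
  rw [pvPhase2 _ hmain.2.2]
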